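-- pv_equiv track=rewrite | github.com/Hepaul7/SegPosCN | embedding_layer.py | extract_sentences
-- ===== SOURCE A (Python) =====
-- from typing import List, Union
--
-- def extract_sentences(data: List[List[str]]) -> List[str]:
--     """ Breaks down some text into individual sentence
--     :param data: List of lists containing character and a label
--     :return: List of strings, where each string is a Chinese sentence
--     """
--     sentences = []
--     curr = ''
--     for ls in data:
--         if len(ls) > 0:
--             curr += ls[0]
--             continue
--         if curr != '':
--             sentences.append(curr)
--             curr = ''
--
--     return sentences
-- ===== SOURCE B (Python) =====
-- from typing import List
--
-- def extract_sentences(data: List[List[str]]) -> List[str]: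
--     """Run-based rewrite: scan maximal runs of non-empty / empty rows with two
--     index pointers; a non-empty run is joined in one pass, an empty run flushes."""
--     sentences = []
--     pending = ''
--     i = 0
--     n = len(data)
--     while i < n:
--         is_text = len(data[i]) > 0
--         j = i
--         while j < n and (len(data[j]) > 0) == is_text:
--             j += 1
--         if is_text:
--             pending = ''.join(r[0] for r in data[i:j])
--         else:
--             if pending != '':
--                 sentences.append(pending)
--             pending = ''
--         i = j
--     return sentences
-- ===== Notes on version B (the rewrite author's own statement) =====
-- stated objective: alternative
-- what changed: Replaces A's row-by-row accumulator loop with a two-pointer scan over maximal runs of non-empty/empty rows: each text run is joined in a single pass and each empty run flushes the pending sentence, with no final flush so a trailing unterminated run is dropped exactly as in A.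
import Mathlib
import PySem

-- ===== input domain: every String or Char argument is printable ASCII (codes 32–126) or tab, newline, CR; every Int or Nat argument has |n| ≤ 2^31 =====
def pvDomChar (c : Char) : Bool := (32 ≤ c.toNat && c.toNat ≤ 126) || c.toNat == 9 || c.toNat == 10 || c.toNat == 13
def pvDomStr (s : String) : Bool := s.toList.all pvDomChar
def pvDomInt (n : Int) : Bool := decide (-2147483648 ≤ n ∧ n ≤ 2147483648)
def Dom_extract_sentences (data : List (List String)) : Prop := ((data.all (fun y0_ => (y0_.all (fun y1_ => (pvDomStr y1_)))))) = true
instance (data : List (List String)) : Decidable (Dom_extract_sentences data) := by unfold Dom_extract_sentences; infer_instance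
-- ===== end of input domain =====

-- B replaces A's row-by-row accumulator with a two-pointer scan over maximal runs of
-- non-empty / empty rows (objective: alternative decomposition, same O(n) cost).


-- ===== PORT A =====
-- one loop step of A: state = (sentences, curr)
def pvAstep (st : List String × String) (ls : List String) : List String × String :=
  if ls.length > 0 then (st.1, st.2 ++ ls.headD "")      -- ls[0]; ls is nonempty in this branch
  else if st.2 ≠ "" then (st.1 ++ [st.2], "") else st

def extract_sentences (data : List (List String)) : List String :=
  (data.foldl pvAstep ([], "")).1

-- ===== PORT B =====
-- ''.join(r[0] for r in group); r is nonempty for every row of a text run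
def pvJoinHeads : List (List String) → String
  | [] => ""
  | r :: rest => r.headD "" ++ pvJoinHeads rest

-- Source B's inner while loop: split data into maximal runs of rows with equal emptiness
def pvRuns : List (List String) → List (Bool × List (List String))
  | [] => []
  | x :: xs =>
    (decide (x.length > 0), x :: xs.takeWhile (fun l => decide (l.length > 0) == decide (x.length > 0))) ::
      pvRuns (xs.dropWhile (fun l => decide (l.length > 0) == decide (x.length > 0)))
  termination_by l => l.length
  decreasing_by simpa using Nat.lt_succ_of_le (List.length_dropWhile_le _ xs)

-- one run of Source B's outer loop: state = (sentences, pending)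
def pvBstep (st : List String × String) (kg : Bool × List (List String)) : List String × String :=
  if kg.1 then (st.1, pvJoinHeads kg.2)
  else ((if st.2 ≠ "" then st.1 ++ [st.2] else st.1), "")

def extract_sentences_alt (data : List (List String)) : List String :=
  ((pvRuns data).foldl pvBstep ([], "")).1

-- ===== PRECONDITION & SPEC =====
def Spec_extract_sentences (data : List (List String)) (out : List String) : Prop := out = extract_sentences_alt data
instance (data : List (List String)) (out : List String) : Decidable (Spec_extract_sentences data out) := by unfold Spec_extract_sentences; infer_instance

-- ===== CLAIM (what is proved, stated in full; the proofs are below) =====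
def Claim_equal_extract_sentences : Prop := ∀ (data : List (List String)), Dom_extract_sentences data → Spec_extract_sentences data (extract_sentences data)

-- ===== LEMMAS AND PROOFS =====

-- A over a run of non-empty rows only concatenates their heads onto curr
theorem pvA_text_run (g : List (List String)) (s : List String) (c : String)
    (h : ∀ l ∈ g, l ≠ []) : g.foldl pvAstep (s, c) = (s, c ++ pvJoinHeads g) := by
  induction g generalizing c with
  | nil => simp [pvJoinHeads]
  | cons r rest ih =>
    have hr : r ≠ [] := h r (by simp)
    have hlen : r.length > 0 := List.length_pos_iff.mpr hr
    simp only [List.foldl_cons, pvAstep, if_pos hlen]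
    rw [ih _ (fun l hl => h l (by simp [hl]))]
    simp [pvJoinHeads, String.append_assoc]

-- A over empty rows with curr = "" does nothing
theorem pvA_empty_rest (g : List (List String)) (s : List String)
    (h : ∀ l ∈ g, l = []) : g.foldl pvAstep (s, "") = (s, "") := by
  induction g with
  | nil => rfl
  | cons r rest ih =>
    have hr : r = [] := h r (by simp)
    simp only [List.foldl_cons, pvAstep, hr]
    simpa using ih (fun l hl => h l (by simp [hl]))

-- A over a nonempty run of empty rows flushes curr (once) and clears it
theorem pvA_empty_run (r : List String) (g : List (List String)) (s : List String) (c : String)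
    (hr : r = []) (h : ∀ l ∈ g, l = []) :
    (r :: g).foldl pvAstep (s, c) = ((if c ≠ "" then s ++ [c] else s), "") := by
  simp only [List.foldl_cons, pvAstep, hr]
  by_cases hc : c = ""
  · simp only [hc]; simpa using pvA_empty_rest g s h
  · simp only [if_pos hc, List.length_nil, gt_iff_lt,
      Nat.lt_irrefl, if_false]
    exact pvA_empty_rest g (s ++ [c]) h

theorem pv_dropWhile_head (p : List String → Bool) (l : List (List String)) (y : List String)
    (h : (l.dropWhile p).head? = some y) : p y = false := by
  induction l with
  | nil => simp at h
  | cons x xs ih =>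
    by_cases hx : p x
    · rw [List.dropWhile_cons_of_pos hx] at h; exact ih h
    · rw [List.dropWhile_cons_of_neg hx] at h
      simp at h; rw [← h]; simpa using hx

-- main invariant: A's fold from (s, c) equals B's fold over the runs, provided curr is
-- empty whenever the next row is non-empty
theorem pvMain : ∀ (n : Nat) (data : List (List String)), data.length ≤ n →
    ∀ (s : List String) (c : String),
    (∀ x, data.head? = some x → x ≠ [] → c = "") →
    data.foldl pvAstep (s, c) = (pvRuns data).foldl pvBstep (s, c) := by
  intro n
  induction n with
  | zero =>
    intro data hlen s c _
    have : data = [] := List.eq_nil_of_length_eq_zero (Nat.le_zero.mp hlen)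
    subst this; simp [pvRuns]
  | succ n ih =>
    intro data hlen s c hc
    cases data with
    | nil => simp [pvRuns]
    | cons x xs =>
      set p : List String → Bool := fun l => decide (l.length > 0) == decide (x.length > 0) with hp
      have hsplit : xs.takeWhile p ++ xs.dropWhile p = xs := List.takeWhile_append_dropWhile
      have hruns : pvRuns (x :: xs) =
          (decide (x.length > 0), x :: xs.takeWhile p) :: pvRuns (xs.dropWhile p) := by
        rw [pvRuns]
      have hlen2 : (xs.dropWhile p).length ≤ n := by
        have := List.length_dropWhile_le p xs
        simp only [List.length_cons] at hlen; omega
      have hdatasplit : x :: xs = (x :: xs.takeWhile p) ++ xs.dropWhile p := by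
        simp [hsplit]
      by_cases hx : x = []
      · -- empty run: key is false; every row of the run is empty
        have hxlen : ¬ (x.length > 0) := by simp [hx]
        have hall : ∀ l ∈ xs.takeWhile p, l = [] := by
          intro l hl
          have := List.mem_takeWhile_imp hl
          simp only [hp, hx] at this
          simpa using List.eq_nil_of_length_eq_zero (by
            rcases Nat.eq_zero_or_pos l.length with h0 | h0
            · exact h0
            · simp [h0] at this)
        conv_lhs => rw [hdatasplit]
        rw [List.foldl_append,
          pvA_empty_run x (xs.takeWhile p) s c hx hall, hruns, List.foldl_cons]
        have hkey : decide (x.length > 0) = false := by simp [hx]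
        have hB : pvBstep (s, c) (decide (x.length > 0), x :: xs.takeWhile p) =
            ((if c ≠ "" then s ++ [c] else s), "") := by
          simp [pvBstep, hkey]
        rw [hB]
        exact ih (xs.dropWhile p) hlen2 _ "" (fun _ _ _ => rfl)
      · -- text run: key is true; c = "" and every row of the run is non-empty
        have hc0 : c = "" := hc x rfl hx
        have hxlen : x.length > 0 := List.length_pos_iff.mpr hx
        have hall : ∀ l ∈ x :: xs.takeWhile p, l ≠ [] := by
          intro l hl
          rcases List.mem_cons.mp hl with h | h
          · exact h ▸ hx
          · have := List.mem_takeWhile_imp h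
            simp only [hp] at this
            intro hnil
            rw [hnil] at this
            simp [hxlen] at this
        conv_lhs => rw [hdatasplit]
        rw [List.foldl_append, pvA_text_run _ s c hall, hruns, List.foldl_cons]
        have hkey : decide (x.length > 0) = true := by simpa using hxlen
        have hB : pvBstep (s, c) (decide (x.length > 0), x :: xs.takeWhile p) =
            (s, pvJoinHeads (x :: xs.takeWhile p)) := by
          simp [pvBstep, hkey]
        rw [hB, hc0, String.empty_append]
        refine ih (xs.dropWhile p) hlen2 _ _ ?_
        intro y hy hyne
        exfalso
        have := pv_dropWhile_head p xs y hy
        simp only [hp] at this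
        have : y.length = 0 := by
          rcases Nat.eq_zero_or_pos y.length with h0 | h0
          · exact h0
          · simp [h0, hxlen] at this
        exact hyne (List.eq_nil_of_length_eq_zero this)

-- ===== VERDICT (by name: the statement is the Claim_ definition above) =====
theorem extract_sentences_spec : Claim_equal_extract_sentences := by
  intro data _
  unfold Spec_extract_sentences extract_sentences extract_sentences_alt
  rw [pvMain data.length data le_rfl [] "" (fun _ _ _ => rfl)]
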